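-- pv_equiv track=rewrite | github.com/MoreiraP12/MAPoRL | src/reward/medical_reward_system.py | _has_complementary_content
-- ===== SOURCE A (Python) =====
-- def _has_complementary_content(text1: str, text2: str) -> bool:
--     """Check if two texts have complementary content."""
--     # Simple heuristic: different focus on medical aspects
--     focus_areas = {
--         "planning": ["plan", "approach", "strategy", "steps"],
--         "research": ["evidence", "study", "research", "literature"],
--         "analysis": ["analysis", "reasoning", "differential", "assessment"],
--         "reporting": ["summary", "conclusion", "recommendation", "report"]
--     }
--
--     text1_lower = text1.lower()
--     text2_lower = text2.lower()
--
--     text1_focuses = set()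
--     text2_focuses = set()
--
--     for focus, keywords in focus_areas.items():
--         if any(keyword in text1_lower for keyword in keywords):
--             text1_focuses.add(focus)
--         if any(keyword in text2_lower for keyword in keywords):
--             text2_focuses.add(focus)
--
--     # Complementary if they have different focuses
--     return len(text1_focuses.intersection(text2_focuses)) < len(text1_focuses.union(text2_focuses))
-- ===== SOURCE B (Python) =====
-- def _has_complementary_content(text1: str, text2: str) -> bool:
--     """Check if two texts have complementary content."""
--     focus_areas = {
--         "planning": ["plan", "approach", "strategy", "steps"],
--         "research": ["evidence", "study", "research", "literature"],
--         "analysis": ["analysis", "reasoning", "differential", "assessment"],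
--         "reporting": ["summary", "conclusion", "recommendation", "report"]
--     }
--     text1_lower = text1.lower()
--     text2_lower = text2.lower()
--     for keywords in focus_areas.values():
--         in1 = any(keyword in text1_lower for keyword in keywords)
--         in2 = any(keyword in text2_lower for keyword in keywords)
--         if in1 != in2:
--             return True
--     return False
-- ===== Notes on version B (the rewrite author's own statement) =====
-- stated objective: simpler
-- what changed: Replaces the two set accumulators and the final intersection-vs-union size comparison with a single short-circuiting loop that returns True as soon as one focus area is present in exactly one of the two texts.
import Mathlib
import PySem

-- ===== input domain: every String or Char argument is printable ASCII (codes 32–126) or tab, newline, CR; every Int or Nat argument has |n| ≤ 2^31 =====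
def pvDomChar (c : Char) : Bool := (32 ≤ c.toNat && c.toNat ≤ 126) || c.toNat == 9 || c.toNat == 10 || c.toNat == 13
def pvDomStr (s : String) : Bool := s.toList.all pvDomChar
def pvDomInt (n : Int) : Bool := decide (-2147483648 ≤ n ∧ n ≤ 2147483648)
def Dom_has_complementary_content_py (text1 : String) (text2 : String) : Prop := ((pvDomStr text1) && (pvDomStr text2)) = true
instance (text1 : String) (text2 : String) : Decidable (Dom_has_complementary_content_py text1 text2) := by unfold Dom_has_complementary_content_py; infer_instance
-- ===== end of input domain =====

-- B drops A's two set accumulators and the set-algebra comparison in favour of a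
-- single short-circuiting loop that returns true on the first focus area present
-- in exactly one text (objective: simpler).

-- ===== PORT A =====
-- the module-level focus_areas dict (insertion order)
def pvFocusAreas : List (String × List String) :=
  [("planning", ["plan", "approach", "strategy", "steps"]),
   ("research", ["evidence", "study", "research", "literature"]),
   ("analysis", ["analysis", "reasoning", "differential", "assessment"]),
   ("reporting", ["summary", "conclusion", "recommendation", "report"])]

def has_complementary_content_py (text1 : String) (text2 : String) : Bool :=
  let text1_lower := PySem.Str.lower text1
  let text2_lower := PySem.Str.lower text2
  let st := pvFocusAreas.foldl
    (fun (st : PySem.Set String × PySem.Set String) fk =>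
      let s1 := if fk.2.any (fun kw => PySem.Str.isIn kw text1_lower) then PySem.Set.add st.1 fk.1 else st.1
      let s2 := if fk.2.any (fun kw => PySem.Str.isIn kw text2_lower) then PySem.Set.add st.2 fk.1 else st.2
      (s1, s2))
    (PySem.Set.empty, PySem.Set.empty)
  decide (PySem.Set.len (PySem.Set.inter st.1 st.2) < PySem.Set.len (PySem.Set.union st.1 st.2))

-- ===== PORT B =====
def pvAltLoop (text1_lower text2_lower : String) : List (String × List String) → Bool
  | [] => false
  | (_, keywords) :: rest =>
      let in1 := keywords.any (fun kw => PySem.Str.isIn kw text1_lower)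
      let in2 := keywords.any (fun kw => PySem.Str.isIn kw text2_lower)
      if in1 != in2 then true else pvAltLoop text1_lower text2_lower rest

def has_complementary_content_py_alt (text1 : String) (text2 : String) : Bool :=
  pvAltLoop (PySem.Str.lower text1) (PySem.Str.lower text2) pvFocusAreas

-- ===== PRECONDITION & SPEC =====
def Spec_has_complementary_content_py (text1 : String) (text2 : String) (out : Bool) : Prop := out = has_complementary_content_py_alt text1 text2
instance (text1 : String) (text2 : String) (out : Bool) : Decidable (Spec_has_complementary_content_py text1 text2 out) := by unfold Spec_has_complementary_content_py; infer_instance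

-- ===== CLAIM (what is proved, stated in full; the proofs are below) =====
def Claim_equal_has_complementary_content_py : Prop := ∀ (text1 : String) (text2 : String), Dom_has_complementary_content_py text1 text2 → Spec_has_complementary_content_py text1 text2 (has_complementary_content_py text1 text2)

-- ===== LEMMAS AND PROOFS =====

-- ===== VERDICT (by name: the statement is the Claim_ definition above) =====
set_option maxHeartbeats 2000000 in
theorem has_complementary_content_py_spec : Claim_equal_has_complementary_content_py := by
  intro text1 text2 _
  unfold Spec_has_complementary_content_py
  unfold has_complementary_content_py has_complementary_content_py_alt
  simp only [pvFocusAreas, List.foldl, pvAltLoop]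
  generalize (["plan", "approach", "strategy", "steps"].any (fun kw => PySem.Str.isIn kw (PySem.Str.lower text1))) = a1
  generalize (["plan", "approach", "strategy", "steps"].any (fun kw => PySem.Str.isIn kw (PySem.Str.lower text2))) = b1
  generalize (["evidence", "study", "research", "literature"].any (fun kw => PySem.Str.isIn kw (PySem.Str.lower text1))) = a2
  generalize (["evidence", "study", "research", "literature"].any (fun kw => PySem.Str.isIn kw (PySem.Str.lower text2))) = b2
  generalize (["analysis", "reasoning", "differential", "assessment"].any (fun kw => PySem.Str.isIn kw (PySem.Str.lower text1))) = a3
  generalize (["analysis", "reasoning", "differential", "assessment"].any (fun kw => PySem.Str.isIn kw (PySem.Str.lower text2))) = b3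
  generalize (["summary", "conclusion", "recommendation", "report"].any (fun kw => PySem.Str.isIn kw (PySem.Str.lower text1))) = a4
  generalize (["summary", "conclusion", "recommendation", "report"].any (fun kw => PySem.Str.isIn kw (PySem.Str.lower text2))) = b4
  cases a1 <;> cases b1 <;> cases a2 <;> cases b2 <;> cases a3 <;> cases b3 <;> cases a4 <;> cases b4 <;> decide
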